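-- pv_equiv track=rewrite | github.com/WilliamSmithEdward/mudproto | mudproto_server/core_logic/command_handlers/debug_acquire.py | _resolve_selector
-- ===== SOURCE A (Python) =====
-- def _find_matches(selector: str, entries: list[dict], kind_filter: str | None = None) -> list[dict]:
--     normalized_selector = str(selector).strip().lower()
--     if not normalized_selector:
--         return []
--
--     candidate_entries = [entry for entry in entries if kind_filter is None or entry["kind"] == kind_filter]
--
--     exact_matches = [
--         entry
--         for entry in candidate_entries
--         if str(entry["id"]).strip().lower() == normalized_selector
--         or str(entry["name"]).strip().lower() == normalized_selector
--     ]
--     if exact_matches: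
--         return exact_matches
--
--     return [
--         entry
--         for entry in candidate_entries
--         if str(entry["id"]).strip().lower().startswith(normalized_selector)
--         or str(entry["name"]).strip().lower().startswith(normalized_selector)
--     ]
--
-- def _resolve_selector(selector: str, entries: list[dict], kind_filter: str | None = None) -> tuple[dict | None, str | None]:
--     matches = _find_matches(selector, entries, kind_filter)
--     if not matches:
--         return None, "No matching acquirable object was found."
--
--     if len(matches) > 1:
--         options = ", ".join(f"{entry['kind']}:{entry['name']}" for entry in matches[:3])
--         return None, f"Multiple matches found. Be more specific: {options}"
--
--     return matches[0], None
-- ===== SOURCE B (Python) =====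
-- def _resolve_selector(selector: str, entries: list[dict], kind_filter: str | None = None) -> tuple[dict | None, str | None]:
--     sel = str(selector).strip().lower()
--     best = 2          # 0 = exact, 1 = prefix, 2 = nothing found yet
--     kept = []         # first up to 3 entries of the current best rank
--     count = 0         # total number of entries of the current best rank
--     if sel:
--         for entry in entries:
--             if kind_filter is not None and entry["kind"] != kind_filter:
--                 continue
--             eid = str(entry["id"]).strip().lower()
--             ename = str(entry["name"]).strip().lower()
--             if eid == sel or ename == sel:
--                 rank = 0
--             elif eid.startswith(sel) or ename.startswith(sel):
--                 rank = 1
--             else: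
--                 continue
--             if rank < best:
--                 best, kept, count = rank, [entry], 1
--             elif rank == best:
--                 count += 1
--                 if len(kept) < 3:
--                     kept.append(entry)
--     if count == 0:
--         return None, "No matching acquirable object was found."
--     if count > 1:
--         options = ", ".join(f"{entry['kind']}:{entry['name']}" for entry in kept)
--         return None, f"Multiple matches found. Be more specific: {options}"
--     return kept[0], None
-- ===== Notes on version B (the rewrite author's own statement) =====
-- stated objective: alternative
-- what changed: Replaces A's build-the-full-exact-and-prefix-match-lists-then-branch design by a streaming best-rank selection: one loop keeps only the best match rank seen so far, a count of entries at that rank, and the first three such entries, so no match list is ever materialized.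
import Mathlib
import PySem

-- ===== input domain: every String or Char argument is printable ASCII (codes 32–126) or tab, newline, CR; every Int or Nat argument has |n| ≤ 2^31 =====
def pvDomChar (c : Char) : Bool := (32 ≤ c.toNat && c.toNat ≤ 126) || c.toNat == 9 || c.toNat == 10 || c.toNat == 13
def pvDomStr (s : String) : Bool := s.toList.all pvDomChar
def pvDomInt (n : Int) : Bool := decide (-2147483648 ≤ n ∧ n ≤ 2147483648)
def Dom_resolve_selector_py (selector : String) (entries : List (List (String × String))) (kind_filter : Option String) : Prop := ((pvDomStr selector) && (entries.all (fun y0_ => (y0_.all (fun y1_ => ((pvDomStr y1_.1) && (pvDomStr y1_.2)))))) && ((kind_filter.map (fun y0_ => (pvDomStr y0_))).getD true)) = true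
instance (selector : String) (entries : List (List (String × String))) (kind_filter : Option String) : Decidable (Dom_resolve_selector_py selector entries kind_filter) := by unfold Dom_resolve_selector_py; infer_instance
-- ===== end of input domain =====

-- B replaces A's build-all-match-lists-then-branch shape by a streaming best-rank selection keeping
-- only a count and the first three entries of the best rank (alternative algorithm, O(1) extra space).
-- ===== PORT A =====
-- dict lookup (first match per the association-list convention); entries inside Pre_ always carry the key
def pvGetK (e : List (String × String)) (k : String) : String :=
  match e.find? (fun p => p.1 == k) with
  | some p => p.2
  | none => ""

-- str(x).strip().lower()
def pvNorm (s : String) : String := PySem.Str.lower (PySem.Str.strip s)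

-- kind_filter is None or entry["kind"] == kind_filter
def pvCandOK (kind_filter : Option String) (e : List (String × String)) : Bool :=
  match kind_filter with | none => true | some kf => pvGetK e "kind" == kf

-- port of _find_matches
def pvFindMatches (selector : String) (entries : List (List (String × String))) (kind_filter : Option String) : List (List (String × String)) :=
  let ns := pvNorm selector
  if ns = "" then []
  else
    let cand := entries.filter (fun e => pvCandOK kind_filter e)
    let ex := cand.filter (fun e => pvNorm (pvGetK e "id") == ns || pvNorm (pvGetK e "name") == ns)
    if ex.isEmpty then
      cand.filter (fun e => PySem.Str.startswith (pvNorm (pvGetK e "id")) ns || PySem.Str.startswith (pvNorm (pvGetK e "name")) ns)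
    else ex

def resolve_selector_py (selector : String) (entries : List (List (String × String))) (kind_filter : Option String) : (Option (List (String × String))) × Option String :=
  let ms := pvFindMatches selector entries kind_filter
  if ms.isEmpty then (none, some "No matching acquirable object was found.")
  else if 1 < ms.length then
    (none, some ("Multiple matches found. Be more specific: " ++ PySem.Str.join ", " ((ms.take 3).map (fun e => pvGetK e "kind" ++ ":" ++ pvGetK e "name"))))
  else (ms.head?, none)

-- ===== PORT B =====
-- one loop step of B: state = (best rank, first ≤3 entries of that rank, count of that rank)
def pvStepB (ns : String) (kind_filter : Option String)
    (st : Nat × List (List (String × String)) × Nat)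
    (e : List (String × String)) : Nat × List (List (String × String)) × Nat :=
  if !(pvCandOK kind_filter e) then st
  else
    let eid := pvNorm (pvGetK e "id")
    let en := pvNorm (pvGetK e "name")
    if eid == ns || en == ns then
      -- rank 0
      if 0 < st.1 then (0, [e], 1)
      else (0, (if st.2.1.length < 3 then st.2.1 ++ [e] else st.2.1), st.2.2 + 1)
    else if PySem.Str.startswith eid ns || PySem.Str.startswith en ns then
      -- rank 1
      if 1 < st.1 then (1, [e], 1)
      else if st.1 = 1 then (1, (if st.2.1.length < 3 then st.2.1 ++ [e] else st.2.1), st.2.2 + 1)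
      else st
    else st

def resolve_selector_py_alt (selector : String) (entries : List (List (String × String))) (kind_filter : Option String) : (Option (List (String × String))) × Option String :=
  let ns := pvNorm selector
  let st := if ns = "" then (2, [], 0) else entries.foldl (pvStepB ns kind_filter) (2, [], 0)
  if st.2.2 = 0 then (none, some "No matching acquirable object was found.")
  else if 1 < st.2.2 then
    (none, some ("Multiple matches found. Be more specific: " ++ PySem.Str.join ", " (st.2.1.map (fun e => pvGetK e "kind" ++ ":" ++ pvGetK e "name"))))
  else (st.2.1.head?, none)

-- ===== PRECONDITION & SPEC =====
-- Pre_ excludes non-blank selectors where some entry lacks a needed key ("id"/"name" for entries passing the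
-- kind filter; "kind" when a kind filter is given or several entries exist): there Python A usually raises
-- KeyError, and on the few such inputs where A's or-short-circuit still returns, the natural B raises
-- KeyError on its eager name lookup.
def Pre_resolve_selector_py (selector : String) (entries : List (List (String × String))) (kind_filter : Option String) : Prop :=
  PySem.Str.strip selector = "" ∨
    ∀ e ∈ entries,
      (pvCandOK kind_filter e = true → (e.any (fun p => p.1 == "id") && e.any (fun p => p.1 == "name")) = true) ∧
      ((kind_filter ≠ none ∨ 1 < entries.length) → e.any (fun p => p.1 == "kind") = true)
instance (selector : String) (entries : List (List (String × String))) (kind_filter : Option String) : Decidable (Pre_resolve_selector_py selector entries kind_filter) := by unfold Pre_resolve_selector_py; infer_instance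
def pvWitness_resolve_selector_py : String × (List (List (String × String))) × Option String :=
  ("sword", [[("id", "s1"), ("name", "Sword"), ("kind", "item")]], none)

def Spec_resolve_selector_py (selector : String) (entries : List (List (String × String))) (kind_filter : Option String) (out : (Option (List (String × String))) × Option String) : Prop := out = resolve_selector_py_alt selector entries kind_filter
instance (selector : String) (entries : List (List (String × String))) (kind_filter : Option String) (out : (Option (List (String × String))) × Option String) : Decidable (Spec_resolve_selector_py selector entries kind_filter out) := by unfold Spec_resolve_selector_py; infer_instance

-- ===== CLAIM (what is proved, stated in full; the proofs are below) =====
def Claim_equal_resolve_selector_py : Prop := ∀ (selector : String) (entries : List (List (String × String))) (kind_filter : Option String), Dom_resolve_selector_py selector entries kind_filter → Pre_resolve_selector_py selector entries kind_filter → Spec_resolve_selector_py selector entries kind_filter (resolve_selector_py selector entries kind_filter)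

-- ===== LEMMAS AND PROOFS =====

-- A's two (kind-filtered) match lists, as named functions
def pvExF (ns : String) (kf : Option String) (l : List (List (String × String))) : List (List (String × String)) :=
  (l.filter (fun e => pvCandOK kf e)).filter (fun e => pvNorm (pvGetK e "id") == ns || pvNorm (pvGetK e "name") == ns)
def pvPfF (ns : String) (kf : Option String) (l : List (List (String × String))) : List (List (String × String)) :=
  (l.filter (fun e => pvCandOK kf e)).filter (fun e => PySem.Str.startswith (pvNorm (pvGetK e "id")) ns || PySem.Str.startswith (pvNorm (pvGetK e "name")) ns)

-- the canonical state B's fold reaches, expressed through A's two match lists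
def pvCanonSt (ex pf : List (List (String × String))) : Nat × List (List (String × String)) × Nat :=
  if ex ≠ [] then (0, ex.take 3, ex.length)
  else if pf ≠ [] then (1, pf.take 3, pf.length)
  else (2, [], 0)

theorem pv_exact_imp_prefix (s ns : String) (h : (s == ns) = true) :
    PySem.Str.startswith s ns = true := by
  have hs : s = ns := by simpa using h
  subst hs
  simp [PySem.Chars.startswith_iff]

theorem pv_take3_append {α : Type} (l : List α) (e : α) :
    (l ++ [e]).take 3 = if l.length < 3 then l.take 3 ++ [e] else l.take 3 := by
  rw [List.take_append]
  by_cases h : l.length < 3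
  · rw [if_pos h, List.take_of_length_le (l := [e]) (by simp only [List.length_cons, List.length_nil]; omega)]
  · rw [if_neg h, show 3 - l.length = 0 from by omega, List.take_zero, List.append_nil]

theorem pv_head?_take3 {α : Type} (l : List α) : (l.take 3).head? = l.head? := by
  cases l <;> rfl

theorem pvExF_append (ns : String) (kf : Option String) (l : List (List (String × String))) (e : List (String × String)) :
    pvExF ns kf (l ++ [e]) = pvExF ns kf l ++
      (if pvCandOK kf e && (pvNorm (pvGetK e "id") == ns || pvNorm (pvGetK e "name") == ns) then [e] else []) := by
  simp only [pvExF, List.filter_append, List.filter_cons, List.filter_nil]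
  split_ifs with h1 h2 h3 <;> simp_all

theorem pvPfF_append (ns : String) (kf : Option String) (l : List (List (String × String))) (e : List (String × String)) :
    pvPfF ns kf (l ++ [e]) = pvPfF ns kf l ++
      (if pvCandOK kf e && (PySem.Str.startswith (pvNorm (pvGetK e "id")) ns || PySem.Str.startswith (pvNorm (pvGetK e "name")) ns) then [e] else []) := by
  simp only [pvPfF, List.filter_append, List.filter_cons, List.filter_nil]
  split_ifs with h1 h2 h3 <;> simp_all

-- one step of B preserves the canonical-state correspondence
theorem pv_step_canon (ns : String) (kf : Option String) (e : List (String × String))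
    (ex pf : List (List (String × String))) :
    pvStepB ns kf (pvCanonSt ex pf) e =
      pvCanonSt
        (ex ++ (if pvCandOK kf e && (pvNorm (pvGetK e "id") == ns || pvNorm (pvGetK e "name") == ns) then [e] else []))
        (pf ++ (if pvCandOK kf e && (PySem.Str.startswith (pvNorm (pvGetK e "id")) ns || PySem.Str.startswith (pvNorm (pvGetK e "name")) ns) then [e] else [])) := by
  by_cases hc : pvCandOK kf e = true
  · unfold pvStepB
    rw [if_neg (show ¬(!pvCandOK kf e) = true from by simp [hc])]
    dsimp only
    by_cases h0 : (pvNorm (pvGetK e "id") == ns || pvNorm (pvGetK e "name") == ns) = true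
    · have h1 : (PySem.Str.startswith (pvNorm (pvGetK e "id")) ns || PySem.Str.startswith (pvNorm (pvGetK e "name")) ns) = true := by
        rcases Bool.or_eq_true_iff.mp h0 with hx | hx
        · exact Bool.or_eq_true_iff.mpr (Or.inl (pv_exact_imp_prefix _ _ hx))
        · exact Bool.or_eq_true_iff.mpr (Or.inr (pv_exact_imp_prefix _ _ hx))
      rw [if_pos h0,
          if_pos (show (pvCandOK kf e && (pvNorm (pvGetK e "id") == ns || pvNorm (pvGetK e "name") == ns)) = true from by rw [hc, h0]; rfl),
          if_pos (show (pvCandOK kf e && (PySem.Str.startswith (pvNorm (pvGetK e "id")) ns || PySem.Str.startswith (pvNorm (pvGetK e "name")) ns)) = true from by rw [hc, h1]; rfl)]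
      by_cases hexe : ex = []
      · subst hexe
        by_cases hpfe : pf = []
        · subst hpfe
          rw [show pvCanonSt [] [] = (2, [], 0) from by simp [pvCanonSt]]
          dsimp only
          rw [if_pos (show (0 : Nat) < 2 from by omega)]
          simp [pvCanonSt]
        · rw [show pvCanonSt [] pf = (1, pf.take 3, pf.length) from by simp [pvCanonSt, hpfe]]
          dsimp only
          rw [if_pos (show (0 : Nat) < 1 from by omega)]
          simp [pvCanonSt]
      · rw [show pvCanonSt ex pf = (0, ex.take 3, ex.length) from by simp [pvCanonSt, hexe],
            show pvCanonSt (ex ++ [e]) (pf ++ [e]) = (0, (ex ++ [e]).take 3, (ex ++ [e]).length) from by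
              simp [pvCanonSt]]
        dsimp only
        rw [if_neg (show ¬(0 : Nat) < 0 from by omega), pv_take3_append]
        by_cases h3 : ex.length < 3
        · rw [if_pos (show (ex.take 3).length < 3 from by rw [List.length_take]; omega), if_pos h3]
          simp
        · rw [if_neg (show ¬(ex.take 3).length < 3 from by rw [List.length_take]; omega), if_neg h3]
          simp
    · have h0f : (pvNorm (pvGetK e "id") == ns || pvNorm (pvGetK e "name") == ns) = false := by
        simpa using h0
      rw [if_neg h0,
          if_neg (show ¬(pvCandOK kf e && (pvNorm (pvGetK e "id") == ns || pvNorm (pvGetK e "name") == ns)) = true from by simp only [h0f, Bool.and_false, Bool.false_eq_true, not_false_eq_true]),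
          List.append_nil]
      by_cases h1 : (PySem.Str.startswith (pvNorm (pvGetK e "id")) ns || PySem.Str.startswith (pvNorm (pvGetK e "name")) ns) = true
      · rw [if_pos h1,
            if_pos (show (pvCandOK kf e && (PySem.Str.startswith (pvNorm (pvGetK e "id")) ns || PySem.Str.startswith (pvNorm (pvGetK e "name")) ns)) = true from by rw [hc, h1]; rfl)]
        by_cases hexe : ex = []
        · subst hexe
          by_cases hpfe : pf = []
          · subst hpfe
            rw [show pvCanonSt [] [] = (2, [], 0) from by simp [pvCanonSt]]
            dsimp only
            rw [if_pos (show (1 : Nat) < 2 from by omega)]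
            simp [pvCanonSt]
          · rw [show pvCanonSt [] pf = (1, pf.take 3, pf.length) from by simp [pvCanonSt, hpfe],
                show pvCanonSt [] (pf ++ [e]) = (1, (pf ++ [e]).take 3, (pf ++ [e]).length) from by
                  simp [pvCanonSt]]
            dsimp only
            rw [if_neg (show ¬(1 : Nat) < 1 from by omega), if_pos (show (1 : Nat) = 1 from rfl),
              pv_take3_append]
            by_cases h3 : pf.length < 3
            · rw [if_pos (show (pf.take 3).length < 3 from by rw [List.length_take]; omega), if_pos h3]
              simp
            · rw [if_neg (show ¬(pf.take 3).length < 3 from by rw [List.length_take]; omega), if_neg h3]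
              simp
        · rw [show pvCanonSt ex pf = (0, ex.take 3, ex.length) from by simp [pvCanonSt, hexe],
              show pvCanonSt ex (pf ++ [e]) = (0, ex.take 3, ex.length) from by simp [pvCanonSt, hexe]]
          dsimp only
          rw [if_neg (show ¬(1 : Nat) < 0 from by omega), if_neg (show ¬(0 : Nat) = 1 from by omega)]
      · have h1f : (PySem.Str.startswith (pvNorm (pvGetK e "id")) ns || PySem.Str.startswith (pvNorm (pvGetK e "name")) ns) = false := by
          simpa using h1
        rw [if_neg h1,
            if_neg (show ¬(pvCandOK kf e && (PySem.Str.startswith (pvNorm (pvGetK e "id")) ns || PySem.Str.startswith (pvNorm (pvGetK e "name")) ns)) = true from by simp only [h1f, Bool.and_false, Bool.false_eq_true, not_false_eq_true]),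
            List.append_nil]
  · have hcf : pvCandOK kf e = false := by simpa using hc
    simp [pvStepB, hcf]

theorem pvStepB_foldl (ns : String) (kf : Option String) (l : List (List (String × String))) :
    l.foldl (pvStepB ns kf) (2, [], 0) = pvCanonSt (pvExF ns kf l) (pvPfF ns kf l) := by
  induction l using List.reverseRecOn with
  | nil => simp [pvExF, pvPfF, pvCanonSt]
  | append_singleton l e ih =>
    rw [List.foldl_append, List.foldl_cons, List.foldl_nil, ih, pvExF_append, pvPfF_append,
      pv_step_canon]

theorem pv_ports_eq (selector : String) (entries : List (List (String × String))) (kind_filter : Option String) :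
    resolve_selector_py selector entries kind_filter = resolve_selector_py_alt selector entries kind_filter := by
  unfold resolve_selector_py resolve_selector_py_alt pvFindMatches
  dsimp only
  by_cases h : pvNorm selector = ""
  · simp [h]
  · rw [if_neg h, if_neg h, pvStepB_foldl]
    rw [show (List.filter (fun e => pvNorm (pvGetK e "id") == pvNorm selector || pvNorm (pvGetK e "name") == pvNorm selector) (List.filter (fun e => pvCandOK kind_filter e) entries)) =
        pvExF (pvNorm selector) kind_filter entries from rfl]
    rw [show (List.filter (fun e => PySem.Str.startswith (pvNorm (pvGetK e "id")) (pvNorm selector) || PySem.Str.startswith (pvNorm (pvGetK e "name")) (pvNorm selector)) (List.filter (fun e => pvCandOK kind_filter e) entries)) =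
        pvPfF (pvNorm selector) kind_filter entries from rfl]
    generalize pvExF (pvNorm selector) kind_filter entries = ex
    generalize pvPfF (pvNorm selector) kind_filter entries = pf
    by_cases hexe : ex = []
    · subst hexe
      rw [show (if ([] : List (List (String × String))).isEmpty = true then pf else ([] : List (List (String × String)))) = pf from rfl]
      by_cases hpfe : pf = []
      · subst hpfe
        rw [show pvCanonSt [] [] = (2, [], 0) from by simp [pvCanonSt]]
        rfl
      · rw [show pvCanonSt [] pf = (1, pf.take 3, pf.length) from by simp [pvCanonSt, hpfe]]
        try dsimp only
        have hpe : pf.isEmpty = false := by simp [hpfe]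
        rw [if_neg (show ¬pf.isEmpty = true from by simp [hpe]),
            if_neg (show ¬pf.length = 0 from by simp [hpfe])]
        by_cases h2 : 1 < pf.length
        · rw [if_pos h2, if_pos h2]
        · rw [if_neg h2, if_neg h2, pv_head?_take3]
    · rw [if_neg (show ¬ex.isEmpty = true from by simp [hexe]),
          show pvCanonSt ex pf = (0, ex.take 3, ex.length) from by simp [pvCanonSt, hexe]]
      try dsimp only
      rw [if_neg (show ¬ex.isEmpty = true from by simp [hexe]),
          if_neg (show ¬ex.length = 0 from by simp [hexe])]
      by_cases h2 : 1 < ex.length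
      · rw [if_pos h2, if_pos h2]
      · rw [if_neg h2, if_neg h2, pv_head?_take3]

-- ===== VERDICT (by name: the statement is the Claim_ definition above) =====
theorem resolve_selector_py_spec : Claim_equal_resolve_selector_py := by
  intro selector entries kind_filter _ _
  unfold Spec_resolve_selector_py
  exact pv_ports_eq selector entries kind_filter
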